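-- pv_equiv track=rewrite | github.com/miliar/Code_Jam_Webscraper | solutions_python/Problem_200/5466.py | minRounds
-- ===== SOURCE A (Python) =====
-- def minRounds(N):
--
--     st = str(N)
--     length = len(st)
--     j = length - 1;
--     num = N;
--     if length==1:
--         return N
--     for i in range(length - 1, 0, -1):
--         qian = int(st[i - 1])
--         hou = int(st[i])
--         if hou < qian:
--             num = N - (hou + 1) * pow(10, (length - i - 1))
--             if i != length - 1:
--                 shengxia = int((length - i - 1) * '9') - int(st[i + 1:])
--                 num = num + shengxia;
--     return num
-- ===== SOURCE B (Python) =====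
-- def minRounds(N):
--     # Single forward pass: find the FIRST place p where a digit drops below its
--     # left neighbour, then directly form the answer: clear digits from p on
--     # (subtract their value) and subtract one more, which decrements the digit
--     # at p-1 and turns everything after it into 9s.
--     st = str(N)
--     L = len(st)
--     for p in range(1, L):
--         if st[p] < st[p - 1]:
--             head = int(st[p])
--             tail = int(st[p + 1:]) if p + 1 < L else 0
--             return N - head * 10 ** (L - p - 1) - tail - 1
--     return N
-- ===== Notes on version B (the rewrite author's own statement) =====
-- stated objective: simpler
-- what changed: A scans the digit string right-to-left over every position, recomputing the candidate from N with pow() and a nines-string correction and letting later overwrites win; B makes one left-to-right pass, returns early at the first digit drop, and forms the answer in closed form (clear the trailing digits, subtract one more).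
-- outside the precondition, e.g. on minRounds(-5): A raises ValueError, B returns -5
import Mathlib
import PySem

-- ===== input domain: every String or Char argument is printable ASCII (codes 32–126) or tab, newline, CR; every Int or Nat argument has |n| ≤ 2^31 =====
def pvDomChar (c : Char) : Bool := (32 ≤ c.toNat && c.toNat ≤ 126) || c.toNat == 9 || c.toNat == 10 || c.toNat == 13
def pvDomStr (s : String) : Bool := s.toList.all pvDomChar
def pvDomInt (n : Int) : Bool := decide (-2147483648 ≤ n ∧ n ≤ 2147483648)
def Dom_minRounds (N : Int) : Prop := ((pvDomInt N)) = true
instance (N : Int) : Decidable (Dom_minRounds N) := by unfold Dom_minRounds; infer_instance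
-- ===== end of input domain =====

-- B re-implements A with one forward scan and an early-return closed formula instead of
-- A's right-to-left overwriting recomputation; equivalence is proved on Pre_ (the
-- non-negative inputs; on negative N the Python A raises ValueError).

-- ===== PORT A =====
def minRounds (N : Int) : Int :=
  -- st = str(N); length = len(st)
  let st := PySem.Int.toStr N
  let length : Int := PySem.Str.len st
  if length == 1 then N
  else
    -- for i in range(length - 1, 0, -1): ...  (num initialised to N)
    (PySem.List.pyRange (length - 1) 0 (-1)).foldl
      (fun num i =>
        -- qian = int(st[i-1]); hou = int(st[i])   (.getD 0 marks the ValueError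
        -- paths of int()/IndexError, never reached for N ≥ 0, excluded by Pre_)
        let qian : Int := ((PySem.Str.pyGet? st (i - 1)).bind (fun c => PySem.Int.ofChars? [c])).getD 0
        let hou : Int := ((PySem.Str.pyGet? st i).bind (fun c => PySem.Int.ofChars? [c])).getD 0
        if hou < qian then
          -- num = N - (hou + 1) * pow(10, (length - i - 1))  (exponent ≥ 0 in the loop)
          let num1 := N - (hou + 1) * 10 ^ (length - i - 1).toNat
          if i ≠ length - 1 then
            -- shengxia = int((length - i - 1) * '9') - int(st[i + 1:])
            let shengxia := (PySem.Int.ofStr? (String.ofList (PySem.List.pyRepeat ['9'] (length - i - 1)))).getD 0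
              - (PySem.Int.ofStr? (PySem.Str.slice st (some (i + 1)) none)).getD 0
            num1 + shengxia
          else num1
        else num) N

-- ===== PORT B =====
-- the 'for p in range(1, L)' loop of Source B with its early return, as a recursion
-- over the index list; st[p] < st[p-1] on 1-char Python strings is the Char order
def minRoundsAltGo (N : Int) (st : String) (length : Int) : List Int → Int
  | [] => N
  | p :: rest =>
    if ((PySem.Str.pyGet? st p).getD ' ') < ((PySem.Str.pyGet? st (p - 1)).getD ' ') then
      -- head = int(st[p]); tail = int(st[p+1:]) if p + 1 < L else 0
      let head : Int := ((PySem.Str.pyGet? st p).bind (fun c => PySem.Int.ofChars? [c])).getD 0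
      let tail : Int := if p + 1 < length then (PySem.Int.ofStr? (PySem.Str.slice st (some (p + 1)) none)).getD 0 else 0
      N - head * 10 ^ (length - p - 1).toNat - tail - 1
    else minRoundsAltGo N st length rest

def minRounds_alt (N : Int) : Int :=
  let st := PySem.Int.toStr N
  let length : Int := PySem.Str.len st
  minRoundsAltGo N st length (PySem.List.pyRange 1 length 1)

-- ===== PRECONDITION & SPEC =====
-- Pre_ excludes exactly the negative inputs, where the Python A raises ValueError
-- (int of the sign character while scanning str(N)).
def Pre_minRounds (N : Int) : Prop := 0 ≤ N
instance (N : Int) : Decidable (Pre_minRounds N) := by unfold Pre_minRounds; infer_instance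
def pvWitness_minRounds : Int := 2024

def Spec_minRounds (N : Int) (out : Int) : Prop := out = minRounds_alt N
instance (N : Int) (out : Int) : Decidable (Spec_minRounds N out) := by unfold Spec_minRounds; infer_instance

-- ===== CLAIM (what is proved, stated in full; the proofs are below) =====
def Claim_equal_minRounds : Prop := ∀ (N : Int), Dom_minRounds N → Pre_minRounds N → Spec_minRounds N (minRounds N)

-- ===== LEMMAS AND PROOFS =====
theorem pvToDigitsCore_eq (f : Nat) : ∀ (n : Nat) (l : List Char), 0 < n → n < 10 ^ f →
    Nat.toDigitsCore 10 f n l = ((Nat.digits 10 n).map Nat.digitChar).reverse ++ l := by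
  induction f with
  | zero => intro n l h1 h2; omega
  | succ f ih =>
    intro n l h1 h2
    rw [Nat.toDigitsCore]
    by_cases hq : n / 10 = 0
    · have hlt : n < 10 := by omega
      rw [Nat.digits_def' (by norm_num) h1, hq]
      simp [Nat.mod_eq_of_lt hlt]
    · rw [if_neg hq, ih (n / 10) _ (by omega) (by
        have h10 : n / 10 < 10 ^ f := by
          rcases Nat.lt_or_ge n (10 ^ f) with h | h
          · exact lt_of_le_of_lt (Nat.div_le_self _ _) h
          · exact Nat.div_lt_of_lt_mul (by rw [pow_succ] at h2; omega)
        exact h10)]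
      rw [Nat.digits_def' (by norm_num) h1]
      simp

theorem pvToChars_eq (N : Int) (h : 0 ≤ N) :
    PySem.Int.toChars N = if N = 0 then ['0'] else ((Nat.digits 10 N.toNat).map Nat.digitChar).reverse := by
  rcases eq_or_lt_of_le h with h0 | hpos
  · simp [PySem.Int.toChars, ← h0]
  · rw [PySem.Int.toChars, if_neg (by omega), if_neg (by omega)]
    rw [Nat.toDigits, pvToDigitsCore_eq (N.toNat + 1) N.toNat [] (by omega)
      (by
        calc N.toNat < 2 ^ N.toNat := Nat.lt_two_pow_self
        _ ≤ 10 ^ N.toNat := Nat.pow_le_pow_left (by norm_num) _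
        _ ≤ 10 ^ (N.toNat + 1) := Nat.pow_le_pow_right (by norm_num) (by omega))]
    simp

theorem pvOfChars_digitChar (d : Nat) (h : d < 10) :
    PySem.Int.ofChars? [Nat.digitChar d] = some (d : Int) := by
  interval_cases d <;> rfl

theorem pvDigitChar_lt_iff (a b : Nat) (ha : a < 10) (hb : b < 10) :
    Nat.digitChar a < Nat.digitChar b ↔ a < b := by
  interval_cases a <;> interval_cases b <;> decide

theorem pvNines (k : Nat) (h1 : 1 ≤ k) (h2 : k ≤ 9) :
    (PySem.Int.ofStr? (String.ofList (PySem.List.pyRepeat ['9'] (k : Int)))).getD 0 = 10 ^ k - 1 := by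
  interval_cases k <;> rfl

-- B's loop step, named for the proofs
def pvBstep (N : Int) (st : String) (length : Int) (p : Int) (acc : Int) : Int :=
  if ((PySem.Str.pyGet? st p).getD ' ') < ((PySem.Str.pyGet? st (p - 1)).getD ' ') then
    N - ((PySem.Str.pyGet? st p).bind (fun c => PySem.Int.ofChars? [c])).getD 0 * 10 ^ (length - p - 1).toNat
      - (if p + 1 < length then (PySem.Int.ofStr? (PySem.Str.slice st (some (p + 1)) none)).getD 0 else 0) - 1
  else acc

theorem pvAltGo_eq_foldr (N : Int) (st : String) (length : Int) (l : List Int) :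
    minRoundsAltGo N st length l = l.foldr (pvBstep N st length) N := by
  induction l with
  | nil => rfl
  | cons p rest ih =>
    rw [minRoundsAltGo, List.foldr_cons, ← ih, pvBstep]

theorem pvFoldr_congr (f g : Int → Int → Int) (init : Int) (l : List Int)
    (H : ∀ i ∈ l, ∀ acc, f i acc = g i acc) : l.foldr f init = l.foldr g init := by
  induction l with
  | nil => rfl
  | cons p rest ih =>
    rw [List.foldr_cons, List.foldr_cons, ih (fun i hi acc => H i (by simp [hi]) acc),
      H p (by simp)]


theorem pvRdsLt (N : Int) (m : Nat) (hm : m < (Nat.digits 10 N.toNat).reverse.length) :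
    (Nat.digits 10 N.toNat).reverse[m] < 10 := by
  apply Nat.digits_lt_base (by norm_num)
  have : (Nat.digits 10 N.toNat).reverse[m] ∈ (Nat.digits 10 N.toNat).reverse := List.getElem_mem _
  rwa [List.mem_reverse] at this

theorem pvGetChar (N : Int) (h0 : 0 ≤ N) (h10 : 10 ≤ N) (m : Nat)
    (hm : m < (Nat.digits 10 N.toNat).reverse.length) :
    PySem.Str.pyGet? (PySem.Int.toStr N) (m : Int) =
      some (Nat.digitChar ((Nat.digits 10 N.toNat).reverse[m])) := by
  have hcs : (PySem.Int.toStr N).toList = (Nat.digits 10 N.toNat).reverse.map Nat.digitChar := by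
    rw [PySem.Int.toList_toStr, pvToChars_eq N h0, if_neg (by omega), List.map_reverse]
  rw [PySem.Str.pyGet?_natCast, hcs]
  rw [List.getElem?_eq_getElem (by simpa using hm)]
  simp

theorem pvStepAgree (N : Int) (h0 : 0 ≤ N) (h31 : N ≤ 2147483648) (h10 : 10 ≤ N)
    (j : Nat) (hj1 : 1 ≤ j) (hjL : j < (Nat.digits 10 N.toNat).length) (acc : Int) :
    (let st := PySem.Int.toStr N
     let length : Int := ((Nat.digits 10 N.toNat).length : Int)
     let qian : Int := ((PySem.Str.pyGet? st ((j : Int) - 1)).bind (fun c => PySem.Int.ofChars? [c])).getD 0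
     let hou : Int := ((PySem.Str.pyGet? st (j : Int)).bind (fun c => PySem.Int.ofChars? [c])).getD 0
     if hou < qian then
       let num1 := N - (hou + 1) * 10 ^ (length - (j : Int) - 1).toNat
       if (j : Int) ≠ length - 1 then
         num1 + ((PySem.Int.ofStr? (String.ofList (PySem.List.pyRepeat ['9'] (length - (j : Int) - 1)))).getD 0
           - (PySem.Int.ofStr? (PySem.Str.slice st (some ((j : Int) + 1)) none)).getD 0)
       else num1
     else acc) = pvBstep N (PySem.Int.toStr N) ((Nat.digits 10 N.toNat).length : Int) (j : Int) acc := by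
  have hrevlen : (Nat.digits 10 N.toNat).reverse.length = (Nat.digits 10 N.toNat).length :=
    List.length_reverse
  have hL10 : (Nat.digits 10 N.toNat).length ≤ 10 :=
    (Nat.digits_length_le_iff (by norm_num) _).mpr (by omega)
  have hcast : ((j : Int) - 1) = ((j - 1 : Nat) : Int) := by omega
  have hgj := pvGetChar N h0 h10 j (by omega)
  have hgj' := pvGetChar N h0 h10 (j - 1) (by omega)
  simp only [pvBstep]
  rw [hcast, hgj, hgj']
  simp only [Option.getD_some, Option.bind_some]
  rw [pvOfChars_digitChar _ (pvRdsLt N j (by omega)), pvOfChars_digitChar _ (pvRdsLt N (j-1) (by omega))]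
  simp only [Option.getD_some]
  by_cases hdesc : (Nat.digits 10 N.toNat).reverse[j]'(by omega) < (Nat.digits 10 N.toNat).reverse[j-1]'(by omega)
  · rw [if_pos (by exact_mod_cast hdesc),
      if_pos ((pvDigitChar_lt_iff _ _ (pvRdsLt N j (by omega)) (pvRdsLt N (j-1) (by omega))).mpr hdesc)]
    by_cases hlast : j = (Nat.digits 10 N.toNat).length - 1
    · rw [if_neg (by omega), if_neg (by omega)]
      have hz : (((Nat.digits 10 N.toNat).length : Int) - (j : Int) - 1).toNat = 0 := by omega
      rw [hz]
      ring
    · rw [if_pos (by omega), if_pos (by omega)]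
      have hkk : ((Nat.digits 10 N.toNat).length : Int) - (j : Int) - 1
          = (((Nat.digits 10 N.toNat).length - 1 - j : Nat) : Int) := by omega
      rw [hkk, pvNines _ (by omega) (by omega)]
      simp only [Int.toNat_natCast]
      ring
  · rw [if_neg (by exact_mod_cast hdesc),
      if_neg (by rw [pvDigitChar_lt_iff _ _ (pvRdsLt N j (by omega)) (pvRdsLt N (j-1) (by omega))]; exact hdesc)]

-- ===== VERDICT =====
theorem minRounds_spec : Claim_equal_minRounds := by
  intro N hDom hPre
  unfold Spec_minRounds Pre_minRounds at *
  unfold Dom_minRounds pvDomInt at hDom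
  rw [decide_eq_true_eq] at hDom
  rw [minRounds, minRounds_alt]
  by_cases hsmall : N < 10
  · -- one digit: both sides return N
    have hlen : PySem.Str.len (PySem.Int.toStr N) = 1 := by
      rw [PySem.Str.len_eq, PySem.Int.toList_toStr, pvToChars_eq N hPre]
      rcases eq_or_lt_of_le hPre with h0 | hpos
      · simp [← h0]
      · rw [if_neg (by omega)]
        have h1 : (Nat.digits 10 N.toNat).length ≤ 1 :=
          (Nat.digits_length_le_iff (by norm_num) _).mpr (by omega)
        have h2 : 0 < (Nat.digits 10 N.toNat).length := by
          have h3 : (0:ℕ) < (Nat.digits 10 N.toNat).length ↔ 10 ^ 0 ≤ N.toNat :=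
            Nat.lt_digits_length_iff (by norm_num) _
          rw [h3]
          simpa using (by omega : 1 ≤ N.toNat)
        simp only [List.length_reverse, List.length_map]
        omega
    rw [hlen]
    norm_num
    rfl
  · -- N ≥ 10
    have h10 : 10 ≤ N := by omega
    have hL2 : 2 ≤ (Nat.digits 10 N.toNat).length := by
      have h : (1:ℕ) < (Nat.digits 10 N.toNat).length := by
        have h3 : (1:ℕ) < (Nat.digits 10 N.toNat).length ↔ 10 ^ 1 ≤ N.toNat :=
          Nat.lt_digits_length_iff (by norm_num) _
        rw [h3]
        simpa using (by omega : 10 ≤ N.toNat)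
      omega
    have hlen : PySem.Str.len (PySem.Int.toStr N) = ((Nat.digits 10 N.toNat).length : Int) := by
      rw [PySem.Str.len_eq, PySem.Int.toList_toStr, pvToChars_eq N hPre, if_neg (by omega)]
      simp
    rw [hlen]
    rw [if_neg (by simp; omega)]
    have hrange : PySem.List.pyRange (((Nat.digits 10 N.toNat).length : Int) - 1) 0 (-1) =
        (PySem.List.pyRange 1 ((Nat.digits 10 N.toNat).length : Int) 1).reverse := by
      rw [PySem.List.pyRange_neg_one_eq_reverse]
      norm_num
    rw [hrange, List.foldl_reverse, pvAltGo_eq_foldr]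
    apply pvFoldr_congr
    intro i hi acc
    rw [PySem.List.mem_pyRange_one] at hi
    obtain ⟨hi1, hiL⟩ := hi
    obtain ⟨j, rfl⟩ : ∃ j : Nat, i = (j : Int) := ⟨i.toNat, by omega⟩
    exact pvStepAgree N hPre (by omega) h10 j (by omega) (by exact_mod_cast hiL) acc
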